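-- pv_equiv track=rewrite | github.com/helix-drop/OCRandTranslation | 归档/DEV_Next/01_dedoc/txtlayer_feature_extractor.py | try_fix_shifted_encoding
-- ===== SOURCE A (Python) =====
-- def try_fix_shifted_encoding(text: str, offset: int = 48) -> str:
--     """
--     尝试修复字符偏移类型的乱码。
--
--     这是针对 Mad_Act 类问题的专门修复方案。
--     某些 PDF 使用非标准字体编码，字符码点有固定偏移。
--
--     :param text: 乱码文本
--     :param offset: 偏移量（Mad_Act 是 +48）
--     :return: 修复后的文本
--     """
--     decoded = []
--     for c in text:
--         new_ord = ord(c) + offset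
--         if 32 <= new_ord <= 126:  # 可打印 ASCII 范围
--             decoded.append(chr(new_ord))
--         else:
--             decoded.append(c)
--     return ''.join(decoded)
-- ===== SOURCE B (Python) =====
-- def try_fix_shifted_encoding(text: str, offset: int = 48) -> str:
--     # Precompute a translation table once: every source codepoint n whose
--     # shifted value n+offset lands in printable ASCII [32, 126] maps to
--     # chr(n+offset); all other characters are left unchanged by translate.
--     # Source codepoints are clamped to the valid Unicode range [0, 0x110000).
--     lo = max(0, 32 - offset)
--     hi = min(0x110000, 127 - offset)
--     table = {n: chr(n + offset) for n in range(lo, hi)}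
--     return text.translate(table)
-- ===== Notes on version B (the rewrite author's own statement) =====
-- stated objective: faster
-- what changed: Replaces the per-character Python-level loop with append/join by a 95-entry translation table built once and a single C-level str.translate call.
import Mathlib
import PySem

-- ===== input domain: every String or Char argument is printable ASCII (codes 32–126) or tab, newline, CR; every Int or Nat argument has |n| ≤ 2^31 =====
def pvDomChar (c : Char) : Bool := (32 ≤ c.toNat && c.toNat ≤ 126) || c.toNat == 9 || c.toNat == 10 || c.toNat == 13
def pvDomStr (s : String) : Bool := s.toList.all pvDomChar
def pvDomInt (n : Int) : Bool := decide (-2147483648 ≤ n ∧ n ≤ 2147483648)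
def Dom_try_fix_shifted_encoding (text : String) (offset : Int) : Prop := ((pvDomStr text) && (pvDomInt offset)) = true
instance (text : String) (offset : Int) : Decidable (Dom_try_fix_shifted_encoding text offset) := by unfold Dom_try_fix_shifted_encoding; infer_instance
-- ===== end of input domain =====

-- B builds a 95-entry translation table once and maps the text through it in one pass (idiomatic str.translate), instead of A's per-character branch with append/join.
-- ===== PORT A =====
def try_fix_shifted_encoding (text : String) (offset : Int) : String :=
  String.mk (text.toList.foldl (fun decoded c =>
    let new_ord : Int := (c.toNat : Int) + offset
    if 32 ≤ new_ord ∧ new_ord ≤ 126 then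
      decoded ++ [Char.ofNat new_ord.toNat]   -- chr(new_ord), exact: 32 ≤ new_ord ≤ 126 here
    else
      decoded ++ [c]) [])

-- ===== PORT B =====
-- the dict comprehension over range(lo, hi): insert each key in order
def pvTable (offset : Int) : PySem.Dict Int Char :=
  (PySem.List.pyRange (max 0 (32 - offset)) (min 1114112 (127 - offset)) 1).foldl
    (fun d n => d.insert n (Char.ofNat (n + offset).toNat)) PySem.Dict.empty

def try_fix_shifted_encoding_alt (text : String) (offset : Int) : String :=
  -- text.translate(table): each char is replaced by its table entry, or kept
  String.mk (text.toList.map (fun c => ((pvTable offset).get? (c.toNat : Int)).getD c))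

-- ===== PRECONDITION & SPEC =====
def Spec_try_fix_shifted_encoding (text : String) (offset : Int) (out : String) : Prop := out = try_fix_shifted_encoding_alt text offset
instance (text : String) (offset : Int) (out : String) : Decidable (Spec_try_fix_shifted_encoding text offset out) := by unfold Spec_try_fix_shifted_encoding; infer_instance

-- ===== CLAIM (what is proved, stated in full; the proofs are below) =====
def Claim_equal_try_fix_shifted_encoding : Prop := ∀ (text : String) (offset : Int), Dom_try_fix_shifted_encoding text offset → Spec_try_fix_shifted_encoding text offset (try_fix_shifted_encoding text offset)

-- ===== LEMMAS AND PROOFS =====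

-- foldl that only appends equals a map
theorem pv_foldl_append (offset : Int) (l : List Char) (acc : List Char) :
    l.foldl (fun decoded c =>
      let new_ord : Int := (c.toNat : Int) + offset
      if 32 ≤ new_ord ∧ new_ord ≤ 126 then decoded ++ [Char.ofNat new_ord.toNat]
      else decoded ++ [c]) acc
    = acc ++ l.map (fun c =>
        if 32 ≤ (c.toNat : Int) + offset ∧ (c.toNat : Int) + offset ≤ 126 then
          Char.ofNat ((c.toNat : Int) + offset).toNat else c) := by
  induction l generalizing acc with
  | nil => simp
  | cons c l ih =>
    simp only [List.foldl_cons, List.map_cons]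
    rw [ih]
    split <;> simp

-- lookup in a fold of inserts with value depending only on the key
theorem pv_get?_foldl_insert (f : Int → Char) (l : List Int) (d : PySem.Dict Int Char) (k : Int) :
    (l.foldl (fun d n => d.insert n (f n)) d).get? k
      = if k ∈ l then some (f k) else d.get? k := by
  induction l generalizing d with
  | nil => simp
  | cons n l ih =>
    simp only [List.foldl_cons, ih, List.mem_cons]
    by_cases hk : k ∈ l
    · simp [hk]
    · by_cases hkn : k = n
      · subst hkn; simp [hk, PySem.Dict.get?_insert_self]
      · simp [hk, hkn, PySem.Dict.get?_insert_of_ne d (f n) hkn]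

theorem pv_char_lt (c : Char) : c.toNat < 1114112 := by
  have h := c.valid
  rcases h with h | ⟨h1, h2⟩ <;> simp only [Char.toNat] <;> omega

theorem pv_table_get? (offset : Int) (c : Char) :
    ((pvTable offset).get? (c.toNat : Int)).getD c
      = if 32 ≤ (c.toNat : Int) + offset ∧ (c.toNat : Int) + offset ≤ 126 then
          Char.ofNat ((c.toNat : Int) + offset).toNat else c := by
  have hlt : c.toNat < 1114112 := pv_char_lt c
  unfold pvTable
  rw [pv_get?_foldl_insert (fun n => Char.ofNat (n + offset).toNat)]
  simp only [PySem.List.mem_pyRange_one]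
  by_cases h : 32 ≤ (c.toNat : Int) + offset ∧ (c.toNat : Int) + offset ≤ 126
  · have hin : max 0 (32 - offset) ≤ (c.toNat : Int) ∧ (c.toNat : Int) < min 1114112 (127 - offset) :=
      ⟨by omega, by omega⟩
    rw [if_pos hin, if_pos h]
    rfl
  · have hout : ¬ (max 0 (32 - offset) ≤ (c.toNat : Int) ∧ (c.toNat : Int) < min 1114112 (127 - offset)) := by
      omega
    rw [if_neg hout, if_neg h]
    simp [PySem.Dict.get?_empty]

-- ===== VERDICT (by name: the statement is the Claim_ definition above) =====
theorem try_fix_shifted_encoding_spec : Claim_equal_try_fix_shifted_encoding := by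
  intro text offset _
  unfold Spec_try_fix_shifted_encoding try_fix_shifted_encoding try_fix_shifted_encoding_alt
  rw [pv_foldl_append]
  simp only [List.nil_append]
  congr 1
  apply List.map_congr_left
  intro c _
  rw [pv_table_get?]
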